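-- pv_equiv track=rewrite | github.com/dna2github/dna2oldmemory | dna2poem/tiny/search.py | split_into_words
-- ===== SOURCE A (Python) =====
-- SKIP_WORDS = [
--     "the", "of", "to", "in", "it", "should", "will", "can", "may",
--     "a", "an", "and", "or", "this", "that", "is", "are", "was", "by",
--     "on", "were", "be", "for", "as", "with", "above"
-- ]
--
-- WORD_STOPS = [
--     " ", ",", ".", "(", ")", "~", "`", "!", "@", ";", "'",
--     "#", "$", "%", "^", "&", "*", "-", "+", "=", "/", "\"",
--     "<", ">", "?", "\\", "{", "}", "[", "]", "|", ":",
--     "\n", "\t",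
-- ]
--
-- def split_into_words(text):
--     word = ''
--     words = []
--     for ch in text:
--         if ch in WORD_STOPS:
--             word = word.lower()
--             if word and not word in SKIP_WORDS:
--                 words.append(word)
--             word = ''
--             continue
--         word += ch
--     if word:
--         words.append(word)
--     return words
-- ===== SOURCE B (Python) =====
-- SKIP_WORDS = [
--     "the", "of", "to", "in", "it", "should", "will", "can", "may",
--     "a", "an", "and", "or", "this", "that", "is", "are", "was", "by",
--     "on", "were", "be", "for", "as", "with", "above"
-- ]
--
-- WORD_STOPS = [
--     " ", ",", ".", "(", ")", "~", "`", "!", "@", ";", "'",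
--     "#", "$", "%", "^", "&", "*", "-", "+", "=", "/", "\"",
--     "<", ">", "?", "\\", "{", "}", "[", "]", "|", ":",
--     "\n", "\t",
-- ]
--
-- _TABLE = str.maketrans(dict.fromkeys(WORD_STOPS, "\x00"))
-- _SKIP = frozenset(SKIP_WORDS)
--
--
-- def split_into_words(text):
--     # one-shot tokenize: map every delimiter to NUL, split once, then filter
--     tokens = text.translate(_TABLE).split("\x00")
--     words = [w for w in (t.lower() for t in tokens[:-1]) if w and w not in _SKIP]
--     if tokens[-1]:
--         words.append(tokens[-1])
--     return words
-- ===== Notes on version B (the rewrite author's own statement) =====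
-- stated objective: faster
-- what changed: Replaces the per-character Python loop (with a list-membership scan of WORD_STOPS per char and inline filtering) by one C-level str.translate to a NUL sentinel plus a single str.split, then a comprehension that lowercases/filters all tokens but the last (which A appends verbatim).
import Mathlib
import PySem

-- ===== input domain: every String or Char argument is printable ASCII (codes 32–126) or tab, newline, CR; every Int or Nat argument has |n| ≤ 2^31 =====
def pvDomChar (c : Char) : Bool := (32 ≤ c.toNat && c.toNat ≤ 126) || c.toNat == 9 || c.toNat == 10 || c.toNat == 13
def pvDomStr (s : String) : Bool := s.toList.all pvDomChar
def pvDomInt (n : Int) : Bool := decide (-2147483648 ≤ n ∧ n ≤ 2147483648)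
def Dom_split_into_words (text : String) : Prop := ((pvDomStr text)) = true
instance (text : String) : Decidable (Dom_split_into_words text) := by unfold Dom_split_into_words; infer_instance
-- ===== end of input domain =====

-- B replaces A's per-character accumulate-and-filter loop by a one-shot translate-to-NUL + split,
-- then filters/lowercases every token but the last (objective: idiomatic).

def pvSkips : List String := [
  "the", "of", "to", "in", "it", "should", "will", "can", "may",
  "a", "an", "and", "or", "this", "that", "is", "are", "was", "by",
  "on", "were", "be", "for", "as", "with", "above"]

def pvStops : List Char := [
  ' ', ',', '.', '(', ')', '~', '`', '!', '@', ';', '\'',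
  '#', '$', '%', '^', '&', '*', '-', '+', '=', '/', '"',
  '<', '>', '?', '\\', '{', '}', '[', ']', '|', ':',
  '\n', '\t']

-- ===== PORT A =====
def loopA : List Char → String → List String → List String
  | [], word, words => if word ≠ "" then words ++ [word] else words
  | c :: cs, word, words =>
    if c ∈ pvStops then
      let w := PySem.Str.lower word
      loopA cs "" (if w ≠ "" ∧ w ∉ pvSkips then words ++ [w] else words)
    else
      loopA cs (word.push c) words

def split_into_words (text : String) : List String := loopA text.toList "" []

-- ===== PORT B =====
-- text.translate(_TABLE): every delimiter becomes NUL
def pvToDelim (c : Char) : Char := if c ∈ pvStops then Char.ofNat 0 else c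

-- str.split("\x00"): split on NUL keeping empty tokens (never returns [])
def pvSplitNul : List Char → List Char → List (List Char)
  | [], cur => [cur]
  | c :: cs, cur => if c = Char.ofNat 0 then cur :: pvSplitNul cs [] else pvSplitNul cs (cur ++ [c])

-- the comprehension body for tokens[:-1]
def pvProcTok (t : List Char) : Option String :=
  let w := PySem.Str.lower (String.ofList t)
  if w ≠ "" ∧ w ∉ pvSkips then some w else none

-- lowercase/filter tokens[:-1], append tokens[-1] verbatim if nonempty
def pvFinish (toks : List (List Char)) : List String :=
  toks.dropLast.filterMap pvProcTok ++
    (match toks.getLast? with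
     | some l => if l = [] then [] else [String.ofList l]
     | none => [])

def split_into_words_alt (text : String) : List String :=
  pvFinish (pvSplitNul (text.toList.map pvToDelim) [])

-- ===== PRECONDITION & SPEC =====
def Spec_split_into_words (text : String) (out : List String) : Prop := out = split_into_words_alt text
instance (text : String) (out : List String) : Decidable (Spec_split_into_words text out) := by unfold Spec_split_into_words; infer_instance

-- ===== CLAIM (what is proved, stated in full; the proofs are below) =====
def Claim_equal_split_into_words : Prop := ∀ (text : String), Dom_split_into_words text → Spec_split_into_words text (split_into_words text)

-- ===== LEMMAS AND PROOFS =====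

theorem pvSplitNul_ne_nil (cs cur : List Char) : pvSplitNul cs cur ≠ [] := by
  induction cs generalizing cur with
  | nil => simp [pvSplitNul]
  | cons c cs ih =>
    simp only [pvSplitNul]
    split <;> simp [ih]

theorem pvFinish_cons (t : List Char) (rest : List (List Char)) (h : rest ≠ []) :
    pvFinish (t :: rest) = (pvProcTok t).toList ++ pvFinish rest := by
  cases rest with
  | nil => exact absurd rfl h
  | cons r rs =>
    unfold pvFinish
    rw [List.dropLast_cons_of_ne_nil (by simp), List.getLast?_cons_cons]
    simp only [List.filterMap_cons]
    cases pvProcTok t <;> simp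

theorem loopA_splitNul (cs : List Char) (cur : List Char) (words : List String)
    (hdom : ∀ c ∈ cs, pvDomChar c = true) :
    loopA cs (String.ofList cur) words = words ++ pvFinish (pvSplitNul (cs.map pvToDelim) cur) := by
  induction cs generalizing cur words with
  | nil =>
    simp only [loopA, List.map_nil, pvSplitNul, pvFinish]
    by_cases h : cur = []
    · subst h; simp
    · have : ¬ String.ofList cur = "" := by simp [h]
      simp [h, this]
  | cons c cs ih =>
    have hc : pvDomChar c = true := hdom c (by simp)
    have hcs : ∀ c' ∈ cs, pvDomChar c' = true := fun c' h' => hdom c' (by simp [h'])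
    by_cases hstop : c ∈ pvStops
    · have hne : pvSplitNul (cs.map pvToDelim) [] ≠ [] := pvSplitNul_ne_nil _ _
      simp only [loopA, hstop, if_pos, List.map_cons, pvToDelim, pvSplitNul]
      rw [pvFinish_cons _ _ hne]
      have h0 : ("" : String) = String.ofList [] := rfl
      rw [h0, ih [] _ hcs]
      unfold pvProcTok
      split
      · next h => simp [h, List.append_assoc]
      · next h => simp [h]
    · have hnul : c ≠ Char.ofNat 0 := by
        intro h; subst h
        simp [pvDomChar] at hc
      have hpush : (String.ofList cur).push c = String.ofList (cur ++ [c]) := by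
        apply String.toList_injective; simp
      simp only [loopA, hstop, List.map_cons, pvToDelim, pvSplitNul, hpush]
      simpa [hnul] using ih (cur ++ [c]) words hcs

-- ===== VERDICT (by name: the statement is the Claim_ definition above) =====
theorem split_into_words_spec : Claim_equal_split_into_words := by
  intro text hdom
  unfold Spec_split_into_words split_into_words split_into_words_alt
  have h : ∀ c ∈ text.toList, pvDomChar c = true := by
    have := hdom
    unfold Dom_split_into_words pvDomStr at this
    simpa [List.all_eq_true] using this
  simpa using loopA_splitNul text.toList [] [] h
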